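-- pv_equiv track=rewrite | github.com/abdullahau/Data-Structures-and-Algorithms-Spring-2024 | Exercises/Week 5/restaurant.py | find
-- ===== SOURCE A (Python) =====
-- def find(a, d):
--     events = []
--
--     for time in a:
--         events.append((time, 1))
--     for time in d:
--         events.append((time, 2))
--
--     events.sort()
--
--     max_vacancy = 0
--     present = 0
--
--     n = len(events)
--     for i in range(n):
--         if present == 0 and i != 0:
--             vacancy = events[i][0] - events[i-1][0]
--             max_vacancy = max(max_vacancy, vacancy)
--
--         if events[i][1] == 1:
--             present += 1
--         elif events[i][1] == 2:
--             present -= 1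
--
--     return max_vacancy
-- ===== SOURCE B (Python) =====
-- def find(a, d):
--     sa = sorted(a)
--     sd = sorted(d)
--     i = j = 0
--     max_vacancy = 0
--     present = 0
--     prev = None
--     while i < len(sa) or j < len(sd):
--         if j >= len(sd) or (i < len(sa) and sa[i] <= sd[j]):
--             t = sa[i]; delta = 1; i += 1
--         else:
--             t = sd[j]; delta = -1; j += 1
--         if present == 0 and prev is not None:
--             max_vacancy = max(max_vacancy, t - prev)
--         present += delta
--         prev = t
--     return max_vacancy
-- ===== Notes on version B (the rewrite author's own statement) =====
-- stated objective: alternative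
-- what changed: Instead of building one combined (time, tag) tuple list and sorting it, B sorts the arrival and departure lists separately and merges them with two pointers (arrivals first on ties) in a single fused scan that tracks occupancy, the previous event time and the maximal gap.
import Mathlib
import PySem

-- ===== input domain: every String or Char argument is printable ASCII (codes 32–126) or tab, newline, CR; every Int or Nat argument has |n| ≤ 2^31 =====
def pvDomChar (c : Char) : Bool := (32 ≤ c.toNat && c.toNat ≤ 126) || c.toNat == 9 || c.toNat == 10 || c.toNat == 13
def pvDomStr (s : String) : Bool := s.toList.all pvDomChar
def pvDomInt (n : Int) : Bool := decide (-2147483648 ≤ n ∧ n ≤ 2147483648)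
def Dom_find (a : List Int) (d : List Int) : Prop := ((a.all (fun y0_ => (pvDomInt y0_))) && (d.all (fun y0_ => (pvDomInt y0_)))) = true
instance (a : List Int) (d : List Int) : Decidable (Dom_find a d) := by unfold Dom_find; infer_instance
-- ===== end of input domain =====

-- B replaces A's sort of one combined tagged event list by sorting arrivals and departures
-- separately and merging them with two pointers in one fused scan (objective: alternative).

-- ===== PORT A =====
def find (a : List Int) (d : List Int) : Int :=
  let events := a.foldl (fun acc t => acc ++ [(t, (1 : Int))]) []
  let events := d.foldl (fun acc t => acc ++ [(t, (2 : Int))]) events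
  let events := PySem.List.sorted2 events Prod.fst Prod.snd false
  let n := PySem.List.len events
  let res := (PySem.List.pyRange 0 n 1).foldl
    (fun st i =>
      let st :=
        if st.2 = 0 ∧ i ≠ 0 then
          (max st.1 ((PySem.List.pyGetD events i (0, 0)).1
             - (PySem.List.pyGetD events (i - 1) (0, 0)).1), st.2)
        else st
      if (PySem.List.pyGetD events i (0, 0)).2 = 1 then (st.1, st.2 + 1)
      else if (PySem.List.pyGetD events i (0, 0)).2 = 2 then (st.1, st.2 - 1)
      else st)
    ((0 : Int), (0 : Int))
  res.1

-- ===== PORT B =====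
-- B's while loop over pointers i,j becomes the obvious recursion over the two remaining suffixes.
def mergeScanB : List Int → List Int → Int → Int → Option Int → Int
  | [], [], maxv, _, _ => maxv
  | [], u :: ds, maxv, present, prev =>
      mergeScanB [] ds
        (if present = 0 ∧ prev ≠ none then max maxv (u - prev.getD 0) else maxv)
        (present - 1) (some u)
  | t :: as, [], maxv, present, prev =>
      mergeScanB as []
        (if present = 0 ∧ prev ≠ none then max maxv (t - prev.getD 0) else maxv)
        (present + 1) (some t)
  | t :: as, u :: ds, maxv, present, prev =>
      if t ≤ u then
        mergeScanB as (u :: ds)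
          (if present = 0 ∧ prev ≠ none then max maxv (t - prev.getD 0) else maxv)
          (present + 1) (some t)
      else
        mergeScanB (t :: as) ds
          (if present = 0 ∧ prev ≠ none then max maxv (u - prev.getD 0) else maxv)
          (present - 1) (some u)
termination_by as ds _ _ _ => as.length + ds.length

def find_alt (a : List Int) (d : List Int) : Int :=
  mergeScanB (PySem.List.sorted a (fun x => x) false)
    (PySem.List.sorted d (fun x => x) false) 0 0 none

-- ===== PRECONDITION & SPEC =====
def Spec_find (a : List Int) (d : List Int) (out : Int) : Prop := out = find_alt a d
instance (a : List Int) (d : List Int) (out : Int) : Decidable (Spec_find a d out) := by unfold Spec_find; infer_instance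

-- ===== CLAIM (what is proved, stated in full; the proofs are below) =====
def Claim_equal_find : Prop := ∀ (a : List Int) (d : List Int), Dom_find a d → Spec_find a d (find a d)

-- ===== LEMMAS AND PROOFS =====

-- lexicographic ≤ on tagged events (Python's tuple order)
def lexLe (p q : Int × Int) : Prop := p.1 < q.1 ∨ (p.1 = q.1 ∧ p.2 ≤ q.2)

-- A's scan, restated structurally over the event list
def scanA : List (Int × Int) → Int → Int → Option Int → Int
  | [], maxv, _, _ => maxv
  | e :: rest, maxv, present, prev =>
      scanA rest
        (if present = 0 ∧ prev ≠ none then max maxv (e.1 - prev.getD 0) else maxv)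
        (if e.2 = 1 then present + 1 else if e.2 = 2 then present - 1 else present)
        (some e.1)

-- the tagged merge of the two sorted lists (the event order B visits)
def tagMerge : List Int → List Int → List (Int × Int)
  | [], ds => ds.map (fun u => (u, 2))
  | t :: as, [] => (t, 1) :: tagMerge as []
  | t :: as, u :: ds =>
      if t ≤ u then (t, 1) :: tagMerge as (u :: ds)
      else (u, 2) :: tagMerge (t :: as) ds
termination_by as ds => as.length + ds.length

lemma insertBy_lex (x : Int × Int) (ys : List (Int × Int)) (h : ys.Pairwise lexLe) :
    (PySem.List.insertBy
      (fun a b => decide (a.1 < b.1) || (!decide (b.1 < a.1) && decide (a.2 < b.2))) x ys).Pairwise lexLe := by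
  induction ys with
  | nil => simp [PySem.List.insertBy]
  | cons y ys ih =>
    rw [PySem.List.insertBy]
    rcases h with _ | ⟨hy, hys⟩
    by_cases hb : (decide (x.1 < y.1) || (!decide (y.1 < x.1) && decide (x.2 < y.2))) = true
    · rw [if_pos hb]
      have hxy : lexLe x y := by
        simp only [Bool.or_eq_true, Bool.and_eq_true, Bool.not_eq_true', decide_eq_true_eq,
          decide_eq_false_iff_not] at hb
        unfold lexLe; omega
      refine List.Pairwise.cons ?_ (List.Pairwise.cons hy hys)
      intro z hz
      rcases List.mem_cons.mp hz with rfl | hz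
      · exact hxy
      · have := hy z hz
        unfold lexLe at *; omega
    · rw [if_neg hb]
      have hyx : lexLe y x := by
        simp only [Bool.or_eq_true, Bool.and_eq_true, Bool.not_eq_true', decide_eq_true_eq,
          decide_eq_false_iff_not, not_or, not_and] at hb
        unfold lexLe
        rcases hb with ⟨h1, h2⟩
        by_cases hlt : y.1 < x.1
        · omega
        · have := h2 (by omega); omega
      refine List.Pairwise.cons ?_ (ih hys)
      intro z hz
      rw [PySem.List.insertBy_mem_iff] at hz
      rcases hz with rfl | hz
      · exact hyx
      · exact hy z hz

lemma sorted2_lex (xs : List (Int × Int)) :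
    (PySem.List.sorted2 xs Prod.fst Prod.snd false).Pairwise lexLe := by
  show (List.foldl _ [] xs).Pairwise lexLe
  have : ∀ (acc : List (Int × Int)), acc.Pairwise lexLe →
      (List.foldl (fun acc x => PySem.List.insertBy
        (fun a b => decide (a.1 < b.1) || (!decide (b.1 < a.1) && decide (a.2 < b.2))) x acc) acc xs).Pairwise lexLe := by
    induction xs with
    | nil => intro acc h; simpa using h
    | cons x xs ih => intro acc h; exact ih _ (insertBy_lex x acc h)
  exact this [] List.Pairwise.nil

lemma tagMerge_nil (ds : List Int) : tagMerge [] ds = ds.map (fun u => (u, 2)) := by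
  rw [tagMerge.eq_def]

lemma tagMerge_cons_nil (t : Int) (as : List Int) :
    tagMerge (t :: as) [] = (t, 1) :: tagMerge as [] := by
  rw [tagMerge.eq_def]

lemma tagMerge_cons_cons (t : Int) (as : List Int) (u : Int) (ds : List Int) :
    tagMerge (t :: as) (u :: ds)
      = if t ≤ u then (t, 1) :: tagMerge as (u :: ds) else (u, 2) :: tagMerge (t :: as) ds := by
  rw [tagMerge.eq_def]

lemma tagMerge_perm (as ds : List Int) :
    (tagMerge as ds).Perm (as.map (fun t => (t, 1)) ++ ds.map (fun u => (u, 2))) := by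
  fun_induction tagMerge as ds with
  | case1 ds => simp
  | case2 t as ih => simpa using ih.cons (t, 1)
  | case3 t as u ds hle ih => exact ih.cons (t, 1)
  | case4 t as u ds hle ih =>
    rw [show (List.map (fun u => ((u:Int), (2:Int))) (u :: ds)) = ((u,2) :: ds.map (fun u => (u,2))) from rfl]
    exact (ih.cons (u, 2)).trans List.perm_middle.symm

lemma tagMerge_pairwise (as ds : List Int)
    (ha : as.Pairwise (· ≤ ·)) (hd : ds.Pairwise (· ≤ ·)) :
    (tagMerge as ds).Pairwise lexLe := by
  fun_induction tagMerge as ds with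
  | case1 ds =>
    exact List.pairwise_map.mpr (hd.imp (fun h => by unfold lexLe; simp; omega))
  | case2 t as ih =>
    refine List.Pairwise.cons ?_ (ih ha.tail hd)
    intro z hz
    have hz' := (tagMerge_perm as []).mem_iff.mp hz
    simp only [List.map_nil, List.append_nil, List.mem_map] at hz'
    obtain ⟨t', ht', rfl⟩ := hz'
    have := List.rel_of_pairwise_cons ha ht'
    unfold lexLe; simp; omega
  | case3 t as u ds hle ih =>
    refine List.Pairwise.cons ?_ (ih ha.tail hd)
    intro z hz
    have hz' := (tagMerge_perm as (u :: ds)).mem_iff.mp hz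
    rcases List.mem_append.mp hz' with h1 | h2
    · obtain ⟨t', ht', rfl⟩ := List.mem_map.mp h1
      have := List.rel_of_pairwise_cons ha ht'
      unfold lexLe; simp; omega
    · obtain ⟨u', hu', rfl⟩ := List.mem_map.mp h2
      have : u ≤ u' := by
        rcases List.mem_cons.mp hu' with rfl | hu''
        · exact le_refl _
        · exact List.rel_of_pairwise_cons hd hu''
      unfold lexLe; simp; omega
  | case4 t as u ds hle ih =>
    refine List.Pairwise.cons ?_ (ih ha hd.tail)
    intro z hz
    have hz' := (tagMerge_perm (t :: as) ds).mem_iff.mp hz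
    rcases List.mem_append.mp hz' with h1 | h2
    · obtain ⟨t', ht', rfl⟩ := List.mem_map.mp h1
      have : t ≤ t' := by
        rcases List.mem_cons.mp ht' with rfl | ht''
        · exact le_refl _
        · exact List.rel_of_pairwise_cons ha ht''
      unfold lexLe; simp; omega
    · obtain ⟨u', hu', rfl⟩ := List.mem_map.mp h2
      have := List.rel_of_pairwise_cons hd hu'
      unfold lexLe; simp; omega

lemma mergeScanB_eq_scanA (as ds : List Int) (maxv present : Int) (prev : Option Int) :
    mergeScanB as ds maxv present prev = scanA (tagMerge as ds) maxv present prev := by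
  fun_induction mergeScanB as ds maxv present prev with
  | case1 maxv p prev => simp [tagMerge_nil, scanA]
  | case2 u ds maxv p prev ih =>
    refine Eq.trans ih ?_
    rw [tagMerge_nil, tagMerge_nil, List.map_cons, scanA]
    simp
  | case3 t as maxv p prev ih =>
    refine Eq.trans ih ?_
    rw [tagMerge_cons_nil, scanA]
    simp
  | case4 t as u ds maxv p prev hle ih =>
    refine Eq.trans ih ?_
    rw [tagMerge_cons_cons, if_pos hle, scanA]
    simp
  | case5 t as u ds maxv p prev hle ih =>
    refine Eq.trans ih ?_
    rw [tagMerge_cons_cons, if_neg hle, scanA]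
    simp

lemma loopA (L : List (Int × Int)) : ∀ (n k : Nat) (st : Int × Int), L.length - k = n → k ≤ L.length →
    ((PySem.List.pyRange (k : Int) ((L.length : Int)) 1).foldl
      (fun st i =>
        let st :=
          if st.2 = 0 ∧ i ≠ 0 then
            (max st.1 ((PySem.List.pyGetD L i (0, 0)).1
               - (PySem.List.pyGetD L (i - 1) (0, 0)).1), st.2)
          else st
        if (PySem.List.pyGetD L i (0, 0)).2 = 1 then (st.1, st.2 + 1)
        else if (PySem.List.pyGetD L i (0, 0)).2 = 2 then (st.1, st.2 - 1)
        else st)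
      st).1
    = scanA (L.drop k) st.1 st.2
        (if k = 0 then none else some ((L.getD (k - 1) (0, 0)).1)) := by
  intro n
  induction n with
  | zero =>
    intro k st hn hk
    have hk' : L.length = k := by omega
    rw [PySem.List.pyRange_one_eq_nil (by exact_mod_cast hk'.le), List.foldl_nil,
      List.drop_eq_nil_of_le hk'.le]
    rfl
  | succ n ih =>
    intro k st hn hk
    have hklt : k < L.length := by omega
    rw [PySem.List.pyRange_one_cons (by exact_mod_cast hklt), List.foldl_cons]
    have hc1 : ((k : Int) + 1) = (((k + 1 : Nat)) : Int) := by push_cast; ring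
    rw [hc1, ih (k + 1) _ (by omega) (by omega)]
    rw [List.drop_eq_getElem_cons hklt, scanA]
    have hgetk : PySem.List.pyGetD L ((k : Nat) : Int) (0, 0) = L[k] := by
      rw [PySem.List.pyGetD_natCast]
      exact List.getD_eq_getElem L (0, 0) hklt
    have hgetDk : L.getD k (0, 0) = L[k] := List.getD_eq_getElem L (0, 0) hklt
    clear ih hc1 hn hk
    rcases Nat.eq_zero_or_pos k with rfl | hpos
    · simp only [Nat.cast_zero] at hgetk
      have hopt : L[0]?.getD ((0 : Int), (0 : Int)) = L[0] := by
        rw [List.getElem?_eq_getElem hklt]; rfl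
      by_cases hp : st.2 = 0 <;> by_cases h1 : L[0].2 = 1 <;> by_cases h2 : L[0].2 = 2 <;>
        simp [hgetk, hopt, hp, h1, h2]
    · have hk0 : k ≠ 0 := hpos.ne'
      have hkne : ((k : Nat) : Int) ≠ 0 := by exact_mod_cast hk0
      have hgetk1 : PySem.List.pyGetD L (((k : Nat) : Int) - 1) (0, 0) = L.getD (k - 1) (0, 0) := by
        rw [show (((k : Nat) : Int) - 1) = (((k - 1 : Nat)) : Int) by omega, PySem.List.pyGetD_natCast]
      have hoptk : L[k]?.getD ((0 : Int), (0 : Int)) = L[k] := by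
        rw [List.getElem?_eq_getElem hklt]; rfl
      by_cases hp : st.2 = 0 <;> by_cases h1 : L[k].2 = 1 <;> by_cases h2 : L[k].2 = 2 <;>
        simp [hgetk, hgetk1, hoptk, hk0, hp, h1, h2]

lemma sorted2_eq_tagMerge (a d : List Int) :
    PySem.List.sorted2
      (a.map (fun t => (t, (1:Int))) ++ d.map (fun u => (u, (2:Int)))) Prod.fst Prod.snd false
    = tagMerge (PySem.List.sorted a (fun x => x) false) (PySem.List.sorted d (fun x => x) false) := by
  refine List.Perm.eq_of_pairwise (le := lexLe) ?_ ?_ ?_ ?_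
  · intro p q _ _ h1 h2
    unfold lexLe at h1 h2
    obtain ⟨p1, p2⟩ := p
    obtain ⟨q1, q2⟩ := q
    simp only [Prod.mk.injEq]
    constructor <;> omega
  · exact sorted2_lex _
  · exact tagMerge_pairwise _ _
      (by simpa using PySem.List.sorted_pairwise a (fun x => x))
      (by simpa using PySem.List.sorted_pairwise d (fun x => x))
  · refine (PySem.List.sorted2_perm _ _ _ _).trans ?_
    refine List.Perm.trans ?_ (tagMerge_perm _ _).symm
    exact List.Perm.append
      (((PySem.List.sorted_perm a (fun x => x) false).map _).symm)
      (((PySem.List.sorted_perm d (fun x => x) false).map _).symm)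

-- ===== VERDICT (by name: the statement is the Claim_ definition above) =====
theorem find_spec : Claim_equal_find := by
  intro a d _
  unfold Spec_find find find_alt
  simp only [PySem.List.foldl_append_singleton_eq_map, List.nil_append, PySem.List.len_eq]
  rw [sorted2_eq_tagMerge a d]
  have h := loopA (tagMerge (PySem.List.sorted a (fun x => x) false)
      (PySem.List.sorted d (fun x => x) false))
      (tagMerge (PySem.List.sorted a (fun x => x) false)
        (PySem.List.sorted d (fun x => x) false)).length 0 ((0 : Int), (0 : Int)) (by omega) (by omega)
  simp only [Nat.cast_zero, List.drop_zero, reduceIte] at h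
  rw [h, mergeScanB_eq_scanA]
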